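-- pv_equiv track=rewrite | github.com/raju-kssdrr/token-savior | src/token_savior/dcp_chunker.py | rabin_fingerprint
-- ===== SOURCE A (Python) =====
-- WINDOW_SIZE = 64     # Rolling-hash window length
--
-- BOUNDARY_MOD = 256   # hash mod BOUNDARY_MOD == 0 → boundary (~256B average)
--
-- MIN_CHUNK = 128      # minimum chunk length
--
-- MAX_CHUNK = 1024     # forced cut above this length
--
-- def _pow_prime(window: int, mod: int, prime: int = 31) -> int:
--     """Cached PRIME**window mod MOD — pre-compute once."""
--     return pow(prime, window, mod)
--
-- def rabin_fingerprint(data: str, window: int = WINDOW_SIZE) -> list[int]: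
--     """Return boundary byte offsets for *data*.
--
--     Algorithm: maintain a rolling polynomial hash over a sliding byte window.
--     Whenever ``h mod BOUNDARY_MOD == 0`` and the current run has reached
--     ``MIN_CHUNK``, emit a boundary. Any run reaching ``MAX_CHUNK`` is cut
--     deterministically to bound worst-case chunk size.
--     """
--     bytes_data = data.encode("utf-8")
--     n = len(bytes_data)
--     if n == 0:
--         return [0, 0]
--     boundaries: list[int] = [0]
--     if n <= window:
--         boundaries.append(n)
--         return boundaries
--
--     PRIME = 31
--     MOD = 2**32
--     prime_pow = _pow_prime(window, MOD, PRIME)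
--
--     h = 0
--     for i in range(window):
--         h = (h * PRIME + bytes_data[i]) % MOD
--
--     for i in range(window, n):
--         h = (h * PRIME + bytes_data[i] - bytes_data[i - window] * prime_pow) % MOD
--         if h % BOUNDARY_MOD == 0:
--             pos = i - window + 1
--             if pos - boundaries[-1] >= MIN_CHUNK:
--                 boundaries.append(pos)
--         elif i - boundaries[-1] >= MAX_CHUNK:
--             boundaries.append(i)
--
--     if boundaries[-1] != n:
--         boundaries.append(n)
--     return boundaries
-- ===== SOURCE B (Python) =====
-- WINDOW_SIZE = 64     # Rolling-hash window length
--
-- BOUNDARY_MOD = 256   # hash mod BOUNDARY_MOD == 0 -> boundary (~256B average)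
--
-- MIN_CHUNK = 128      # minimum chunk length
--
-- MAX_CHUNK = 1024     # forced cut above this length
--
-- def rabin_fingerprint(data: str, window: int = WINDOW_SIZE) -> list[int]:
--     """Prefix-hash reformulation: instead of carrying a rolling hash, build the
--     table of polynomial prefix hashes once; the hash of any window is then a
--     single subtraction pref[i+1] - pref[i-window+1]*PRIME**window (mod 2**32)."""
--     bytes_data = data.encode("utf-8")
--     n = len(bytes_data)
--     if n == 0:
--         return [0, 0]
--     if n <= window:
--         return [0, n]
--     PRIME = 31
--     MOD = 2 ** 32
--     pref = [0] * (n + 1)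
--     for k in range(n):
--         pref[k + 1] = (pref[k] * PRIME + bytes_data[k]) % MOD
--     pw = pow(PRIME, window, MOD)
--     boundaries = [0]
--     for i in range(window, n):
--         h = (pref[i + 1] - pref[i - window + 1] * pw) % MOD
--         if h % BOUNDARY_MOD == 0:
--             pos = i - window + 1
--             if pos - boundaries[-1] >= MIN_CHUNK:
--                 boundaries.append(pos)
--         elif i - boundaries[-1] >= MAX_CHUNK:
--             boundaries.append(i)
--     if boundaries[-1] != n:
--         boundaries.append(n)
--     return boundaries
-- ===== Notes on version B (the rewrite author's own statement) =====
-- stated objective: alternative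
-- what changed: B drops A's incrementally-maintained rolling hash and instead builds a prefix-polynomial-hash table once, obtaining each window hash as a single subtraction pref[i+1] - pref[i-window+1]*PRIME**window (mod 2**32); boundary-emission logic is unchanged.
-- outside the precondition, e.g. on rabin_fingerprint('abc', -1): A raises IndexError, B raises IndexError
import Mathlib
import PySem

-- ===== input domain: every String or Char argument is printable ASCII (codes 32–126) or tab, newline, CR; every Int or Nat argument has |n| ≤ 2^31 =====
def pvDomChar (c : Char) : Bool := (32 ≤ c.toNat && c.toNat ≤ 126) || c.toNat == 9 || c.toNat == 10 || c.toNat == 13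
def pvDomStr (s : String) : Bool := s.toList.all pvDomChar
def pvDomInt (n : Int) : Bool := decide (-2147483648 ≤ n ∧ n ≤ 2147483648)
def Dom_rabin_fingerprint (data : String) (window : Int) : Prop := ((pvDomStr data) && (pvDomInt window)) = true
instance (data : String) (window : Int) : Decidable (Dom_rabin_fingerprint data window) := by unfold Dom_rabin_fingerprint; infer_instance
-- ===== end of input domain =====

-- B replaces A's rolling-hash state with a table of prefix hashes built once (each window
-- hash is then one subtraction); same boundary rule, same outputs ('alternative').

-- ===== PORT A =====
-- data.encode("utf-8"): on the ASCII domain Dom, one byte per character, value = code point.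
def pvByte (c : Char) : Int := (c.toNat : Int)

def rabin_fingerprint (data : String) (window : Int) : List Int :=
  let bytes_data := data.toList.map pvByte
  let n : Int := bytes_data.length
  if n = 0 then [0, 0]
  else
    let boundaries : List Int := [0]
    if n ≤ window then boundaries ++ [n]
    else
      -- _pow_prime(window, 2**32, 31) = pow(31, window, 2**32); window ≥ 0 under Pre_
      let prime_pow := PySem.Int.powMod 31 window.toNat (2 ^ 32)
      let h : Int := (PySem.List.pyRange 0 window 1).foldl
        (fun h i => PySem.Int.mod (h * 31 + PySem.List.pyGetD bytes_data i 0) (2 ^ 32)) 0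
      let st := (PySem.List.pyRange window n 1).foldl
        (fun (st : Int × List Int) i =>
          let h := PySem.Int.mod (st.1 * 31 + PySem.List.pyGetD bytes_data i 0
                     - PySem.List.pyGetD bytes_data (i - window) 0 * prime_pow) (2 ^ 32)
          if PySem.Int.mod h 256 = 0 then
            let pos := i - window + 1
            if pos - PySem.List.pyGetD st.2 (-1) 0 ≥ 128 then (h, st.2 ++ [pos]) else (h, st.2)
          else if i - PySem.List.pyGetD st.2 (-1) 0 ≥ 1024 then (h, st.2 ++ [i]) else (h, st.2))
        (h, boundaries)
      let boundaries := st.2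
      if PySem.List.pyGetD boundaries (-1) 0 ≠ n then boundaries ++ [n] else boundaries

-- ===== PORT B =====
-- Source B's pref-building loop: pref[k+1] = (pref[k]*31 + byte_k) % 2**32, built left to right
def pvPref (h : Int) : List Int → List Int
  | [] => [h]
  | b :: t => h :: pvPref (PySem.Int.mod (h * 31 + b) (2 ^ 32)) t

def rabin_fingerprint_alt (data : String) (window : Int) : List Int :=
  let bytes_data := data.toList.map pvByte
  let n : Int := bytes_data.length
  if n = 0 then [0, 0]
  else if n ≤ window then [0, n]
  else
    let pref := pvPref 0 bytes_data
    let pw := PySem.Int.powMod 31 window.toNat (2 ^ 32)   -- pow(31, window, 2**32); window ≥ 0 under Pre_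
    let boundaries := (PySem.List.pyRange window n 1).foldl
      (fun (bs : List Int) i =>
        let h := PySem.Int.mod (PySem.List.pyGetD pref (i + 1) 0
                   - PySem.List.pyGetD pref (i - window + 1) 0 * pw) (2 ^ 32)
        if PySem.Int.mod h 256 = 0 then
          let pos := i - window + 1
          if pos - PySem.List.pyGetD bs (-1) 0 ≥ 128 then bs ++ [pos] else bs
        else if i - PySem.List.pyGetD bs (-1) 0 ≥ 1024 then bs ++ [i] else bs)
      [0]
    if PySem.List.pyGetD boundaries (-1) 0 ≠ n then boundaries ++ [n] else boundaries

-- ===== PRECONDITION & SPEC =====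
-- Pre_ excludes a negative window on non-empty data: there A indexes bytes_data[i - window]
-- past the end of the byte string and raises IndexError.
def Pre_rabin_fingerprint (data : String) (window : Int) : Prop := data = "" ∨ 0 ≤ window
instance (data : String) (window : Int) : Decidable (Pre_rabin_fingerprint data window) := by
  unfold Pre_rabin_fingerprint; infer_instance
def pvWitness_rabin_fingerprint : String × Int := ("ab", 1)

def Spec_rabin_fingerprint (data : String) (window : Int) (out : List Int) : Prop := out = rabin_fingerprint_alt data window
instance (data : String) (window : Int) (out : List Int) : Decidable (Spec_rabin_fingerprint data window out) := by unfold Spec_rabin_fingerprint; infer_instance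

-- ===== CLAIM (what is proved, stated in full; the proofs are below) =====
def Claim_equal_rabin_fingerprint : Prop := ∀ (data : String) (window : Int), Dom_rabin_fingerprint data window → Pre_rabin_fingerprint data window → Spec_rabin_fingerprint data window (rabin_fingerprint data window)

-- ===== LEMMAS AND PROOFS =====

-- zeta-reduced forms of the two loop bodies and of the two whole ports (proof layer;
-- pvBodyA/pvBodyB are definitionally equal to the ports applied to the byte list)
def pvStepA (xs : List Int) (window pw : Int) (st : Int × List Int) (i : Int) : Int × List Int :=
  if PySem.Int.mod (PySem.Int.mod (st.1 * 31 + PySem.List.pyGetD xs i 0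
        - PySem.List.pyGetD xs (i - window) 0 * pw) (2 ^ 32)) 256 = 0 then
    if i - window + 1 - PySem.List.pyGetD st.2 (-1) 0 ≥ 128 then
      (PySem.Int.mod (st.1 * 31 + PySem.List.pyGetD xs i 0
        - PySem.List.pyGetD xs (i - window) 0 * pw) (2 ^ 32), st.2 ++ [i - window + 1])
    else
      (PySem.Int.mod (st.1 * 31 + PySem.List.pyGetD xs i 0
        - PySem.List.pyGetD xs (i - window) 0 * pw) (2 ^ 32), st.2)
  else if i - PySem.List.pyGetD st.2 (-1) 0 ≥ 1024 then
    (PySem.Int.mod (st.1 * 31 + PySem.List.pyGetD xs i 0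
      - PySem.List.pyGetD xs (i - window) 0 * pw) (2 ^ 32), st.2 ++ [i])
  else
    (PySem.Int.mod (st.1 * 31 + PySem.List.pyGetD xs i 0
      - PySem.List.pyGetD xs (i - window) 0 * pw) (2 ^ 32), st.2)

def pvStepB (xs : List Int) (window pw : Int) (bs : List Int) (i : Int) : List Int :=
  if PySem.Int.mod (PySem.Int.mod (PySem.List.pyGetD (pvPref 0 xs) (i + 1) 0
        - PySem.List.pyGetD (pvPref 0 xs) (i - window + 1) 0 * pw) (2 ^ 32)) 256 = 0 then
    if i - window + 1 - PySem.List.pyGetD bs (-1) 0 ≥ 128 then bs ++ [i - window + 1] else bs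
  else if i - PySem.List.pyGetD bs (-1) 0 ≥ 1024 then bs ++ [i] else bs

def pvBodyA (xs : List Int) (window : Int) : List Int :=
  if ((xs.length : Nat) : Int) = 0 then [0, 0]
  else if ((xs.length : Nat) : Int) ≤ window then [0] ++ [((xs.length : Nat) : Int)]
  else
    if PySem.List.pyGetD
        ((PySem.List.pyRange window ((xs.length : Nat) : Int) 1).foldl
          (pvStepA xs window (PySem.Int.powMod 31 window.toNat (2 ^ 32)))
          ((PySem.List.pyRange 0 window 1).foldl
            (fun h i => PySem.Int.mod (h * 31 + PySem.List.pyGetD xs i 0) (2 ^ 32)) 0, [0])).2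
        (-1) 0 ≠ ((xs.length : Nat) : Int) then
      ((PySem.List.pyRange window ((xs.length : Nat) : Int) 1).foldl
        (pvStepA xs window (PySem.Int.powMod 31 window.toNat (2 ^ 32)))
        ((PySem.List.pyRange 0 window 1).foldl
          (fun h i => PySem.Int.mod (h * 31 + PySem.List.pyGetD xs i 0) (2 ^ 32)) 0, [0])).2
        ++ [((xs.length : Nat) : Int)]
    else
      ((PySem.List.pyRange window ((xs.length : Nat) : Int) 1).foldl
        (pvStepA xs window (PySem.Int.powMod 31 window.toNat (2 ^ 32)))
        ((PySem.List.pyRange 0 window 1).foldl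
          (fun h i => PySem.Int.mod (h * 31 + PySem.List.pyGetD xs i 0) (2 ^ 32)) 0, [0])).2

def pvBodyB (xs : List Int) (window : Int) : List Int :=
  if ((xs.length : Nat) : Int) = 0 then [0, 0]
  else if ((xs.length : Nat) : Int) ≤ window then [0, ((xs.length : Nat) : Int)]
  else
    if PySem.List.pyGetD
        ((PySem.List.pyRange window ((xs.length : Nat) : Int) 1).foldl
          (pvStepB xs window (PySem.Int.powMod 31 window.toNat (2 ^ 32))) [0])
        (-1) 0 ≠ ((xs.length : Nat) : Int) then
      ((PySem.List.pyRange window ((xs.length : Nat) : Int) 1).foldl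
        (pvStepB xs window (PySem.Int.powMod 31 window.toNat (2 ^ 32))) [0]) ++ [((xs.length : Nat) : Int)]
    else
      ((PySem.List.pyRange window ((xs.length : Nat) : Int) 1).foldl
        (pvStepB xs window (PySem.Int.powMod 31 window.toNat (2 ^ 32))) [0])

-- prefix hash of the first k bytes (pref[k] in B; the value A's rolling hash is built from)
def pvPrefAt (xs : List Int) (k : Nat) : Int :=
  (xs.take k).foldl (fun h b => PySem.Int.mod (h * 31 + b) (2 ^ 32)) 0

lemma pvPrefAt_succ (xs : List Int) (k : Nat) (hk : k < xs.length) :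
    pvPrefAt xs (k + 1) = PySem.Int.mod (pvPrefAt xs k * 31 + xs.getD k 0) (2 ^ 32) := by
  unfold pvPrefAt
  rw [List.take_add_one, List.getElem?_eq_getElem hk, List.getD_eq_getElem xs 0 hk,
    Option.toList_some, List.foldl_append, List.foldl_cons, List.foldl_nil]

lemma pv_fold_bounds (l : List Int) (h : Int) (h0 : 0 ≤ h) (h1 : h < 2 ^ 32) :
    0 ≤ l.foldl (fun h b => PySem.Int.mod (h * 31 + b) (2 ^ 32)) h ∧
    l.foldl (fun h b => PySem.Int.mod (h * 31 + b) (2 ^ 32)) h < 2 ^ 32 := by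
  induction l generalizing h with
  | nil => exact ⟨h0, h1⟩
  | cons b t ih =>
      exact ih _ (PySem.Int.mod_nonneg _ (by norm_num)) (PySem.Int.mod_lt _ (by norm_num))

lemma pvPrefAt_mod (xs : List Int) (k : Nat) :
    PySem.Int.mod (pvPrefAt xs k) (2 ^ 32) = pvPrefAt xs k := by
  have h := pv_fold_bounds (xs.take k) 0 le_rfl (by norm_num)
  rw [PySem.Int.mod_eq_emod_of_pos (by norm_num)]
  exact Int.emod_eq_of_lt h.1 h.2

lemma pvPref_getD (xs : List Int) (h : Int) (k : Nat) (hk : k ≤ xs.length) :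
    (pvPref h xs).getD k 0 =
      (xs.take k).foldl (fun a b => PySem.Int.mod (a * 31 + b) (2 ^ 32)) h := by
  induction xs generalizing h k with
  | nil =>
      have : k = 0 := by simpa using hk
      subst this; simp [pvPref]
  | cons b t ih =>
      cases k with
      | zero => simp [pvPref]
      | succ k => simpa [pvPref] using ih _ k (by simpa using hk)

lemma pv_init_fold (xs : List Int) (w : Nat) (hw : w ≤ xs.length) :
    (PySem.List.pyRange 0 (w : Int) 1).foldl
      (fun h i => PySem.Int.mod (h * 31 + PySem.List.pyGetD xs i 0) (2 ^ 32)) 0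
    = pvPrefAt xs w := by
  induction w with
  | zero => simp [PySem.List.pyRange_one_eq_nil, pvPrefAt]
  | succ w ih =>
      have h1 : ((w + 1 : Nat) : Int) = (w : Int) + 1 := by push_cast; ring
      rw [h1, PySem.List.pyRange_one_succ_right (by positivity), List.foldl_append,
        ih (by omega), List.foldl_cons, List.foldl_nil, PySem.List.pyGetD_natCast,
        pvPrefAt_succ xs w (by omega)]

-- the rolling update applied to a windowed prefix difference yields the next windowed
-- prefix difference (all mod 2^32; pw arbitrary)
lemma pv_key (p q x y pw : Int) :
    PySem.Int.mod (PySem.Int.mod (p - q * pw) (2 ^ 32) * 31 + x - y * pw) (2 ^ 32)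
    = PySem.Int.mod (PySem.Int.mod (p * 31 + x) (2 ^ 32)
        - PySem.Int.mod (q * 31 + y) (2 ^ 32) * pw) (2 ^ 32) := by
  have M : (0:Int) < 2 ^ 32 := by norm_num
  simp only [PySem.Int.mod_eq_emod_of_pos M]
  have e : ∀ a : Int, (a % (2 ^ 32)) ≡ a [ZMOD (2 ^ 32)] := fun a =>
    Int.emod_emod_of_dvd a dvd_rfl
  have l1 : ((p - q * pw) % (2 ^ 32) * 31 + x - y * pw)
      ≡ ((p - q * pw) * 31 + x - y * pw) [ZMOD (2 ^ 32)] :=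
    (((e (p - q * pw)).mul_right 31).add_right x).sub_right (y * pw)
  have l2 : ((p * 31 + x) % (2 ^ 32) - (q * 31 + y) % (2 ^ 32) * pw)
      ≡ ((p * 31 + x) - (q * 31 + y) * pw) [ZMOD (2 ^ 32)] :=
    (e (p * 31 + x)).sub ((e (q * 31 + y)).mul_right pw)
  have mid : ((p - q * pw) * 31 + x - y * pw) = ((p * 31 + x) - (q * 31 + y) * pw) := by ring
  exact (l1.trans (by rw [mid])).trans l2.symm

-- one loop iteration: A's state update carries the next windowed hash and performs
-- exactly B's boundary update
lemma pv_step_eq (xs : List Int) (pw : Int) (w j : Nat) (hwj : w ≤ j) (hj : j < xs.length)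
    (bs : List Int) :
    pvStepA xs (w : Int) pw
      (PySem.Int.mod (pvPrefAt xs j - pvPrefAt xs (j - w) * pw) (2 ^ 32), bs) (j : Int)
    = (PySem.Int.mod (pvPrefAt xs (j + 1) - pvPrefAt xs (j + 1 - w) * pw) (2 ^ 32),
       pvStepB xs (w : Int) pw bs (j : Int)) := by
  have c1 : (j : Int) - (w : Int) = ((j - w : Nat) : Int) := by push_cast [hwj]; ring
  have c2 : (j : Int) + 1 = ((j + 1 : Nat) : Int) := by push_cast; ring
  have c3 : (j : Int) - (w : Int) + 1 = ((j - w + 1 : Nat) : Int) := by push_cast [hwj]; ring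
  have hjw : j + 1 - w = j - w + 1 := by omega
  have hA : PySem.Int.mod
      (PySem.Int.mod (pvPrefAt xs j - pvPrefAt xs (j - w) * pw) (2 ^ 32) * 31
        + PySem.List.pyGetD xs (j : Int) 0
        - PySem.List.pyGetD xs ((j : Int) - (w : Int)) 0 * pw) (2 ^ 32)
      = PySem.Int.mod (pvPrefAt xs (j + 1) - pvPrefAt xs (j + 1 - w) * pw) (2 ^ 32) := by
    rw [c1, PySem.List.pyGetD_natCast, PySem.List.pyGetD_natCast,
      pv_key, ← pvPrefAt_succ xs j (by omega), ← pvPrefAt_succ xs (j - w) (by omega), hjw]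
  have hB : PySem.Int.mod
      (PySem.List.pyGetD (pvPref 0 xs) ((j : Int) + 1) 0
        - PySem.List.pyGetD (pvPref 0 xs) ((j : Int) - (w : Int) + 1) 0 * pw) (2 ^ 32)
      = PySem.Int.mod (pvPrefAt xs (j + 1) - pvPrefAt xs (j + 1 - w) * pw) (2 ^ 32) := by
    rw [c2, c3, PySem.List.pyGetD_natCast, PySem.List.pyGetD_natCast,
      pvPref_getD xs 0 (j + 1) (by omega), pvPref_getD xs 0 (j - w + 1) (by omega), hjw]
    rfl
  unfold pvStepA pvStepB
  simp only [hA, hB]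
  split_ifs <;> rfl

lemma pv_loop (xs : List Int) (pw : Int) (w : Nat) :
    ∀ (d j : Nat), w ≤ j → j + d = xs.length → ∀ (bs : List Int),
    ((PySem.List.pyRange (j : Int) ((xs.length : Nat) : Int) 1).foldl (pvStepA xs (w : Int) pw)
        (PySem.Int.mod (pvPrefAt xs j - pvPrefAt xs (j - w) * pw) (2 ^ 32), bs)).2
    = (PySem.List.pyRange (j : Int) ((xs.length : Nat) : Int) 1).foldl (pvStepB xs (w : Int) pw) bs := by
  intro d
  induction d with
  | zero =>
      intro j hwj hlen bs
      rw [PySem.List.pyRange_one_eq_nil (by omega)]; rfl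
  | succ d ih =>
      intro j hwj hlen bs
      have hj : (j : Int) < ((xs.length : Nat) : Int) := by exact_mod_cast (by omega : j < xs.length)
      rw [PySem.List.pyRange_one_cons hj]
      simp only [List.foldl_cons]
      rw [pv_step_eq xs pw w j hwj (by omega) bs]
      have c2 : (j : Int) + 1 = ((j + 1 : Nat) : Int) := by push_cast; ring
      rw [c2]
      exact ih (j + 1) (by omega) (by omega) _

lemma pv_body (xs : List Int) (window : Int) (hpre : xs = [] ∨ 0 ≤ window) :
    pvBodyA xs window = pvBodyB xs window := by
  unfold pvBodyA pvBodyB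
  by_cases c1 : ((xs.length : Nat) : Int) = 0
  · rw [if_pos c1, if_pos c1]
  · rw [if_neg c1, if_neg c1]
    by_cases c2 : ((xs.length : Nat) : Int) ≤ window
    · rw [if_pos c2, if_pos c2]; rfl
    · rw [if_neg c2, if_neg c2]
      have hw0 : 0 ≤ window := by
        rcases hpre with he | h
        · exfalso; apply c1; simp [he]
        · exact h
      set w := window.toNat with hwdef
      have hwin : window = (w : Int) := (Int.toNat_of_nonneg hw0).symm
      have hwlt : w < xs.length := by omega
      rw [hwin]
      have ie : (PySem.List.pyRange 0 (w : Int) 1).foldl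
          (fun h i => PySem.Int.mod (h * 31 + PySem.List.pyGetD xs i 0) (2 ^ 32)) 0
          = PySem.Int.mod (pvPrefAt xs w
              - pvPrefAt xs (w - w) * PySem.Int.powMod 31 w (2 ^ 32)) (2 ^ 32) := by
        rw [pv_init_fold xs w (by omega), Nat.sub_self,
          show pvPrefAt xs 0 = 0 from rfl, zero_mul, sub_zero, pvPrefAt_mod]
      rw [ie, pv_loop xs (PySem.Int.powMod 31 w (2 ^ 32)) w (xs.length - w) w le_rfl (by omega) [0]]

-- ===== VERDICT (by name: the statement is the Claim_ definition above) =====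
theorem rabin_fingerprint_spec : Claim_equal_rabin_fingerprint := by
  intro data window _ hpre
  unfold Spec_rabin_fingerprint
  have hA : rabin_fingerprint data window = pvBodyA (data.toList.map pvByte) window := rfl
  have hB : rabin_fingerprint_alt data window = pvBodyB (data.toList.map pvByte) window := rfl
  rw [hA, hB]
  apply pv_body
  rcases hpre with he | h
  · left; subst he; rfl
  · right; exact h
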